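-- pv_equiv track=rewrite | github.com/rcampbell30/town-warden | backend/agents/insights.py | _source_context
-- ===== SOURCE A (Python) =====
-- def _source_context(source_health):
--     grouped = {
--         "connected": [],
--         "pending": [],
--         "rate_limited": [],
--         "disconnected": [],
--         "disabled": [],
--     }
--
--     for source_name, data in (source_health or {}).items():
--         status = str(data.get("status", "unknown")).lower()
--
--         if status in grouped:
--             grouped[status].append(source_name)
--
--     return grouped
-- ===== SOURCE B (Python) =====
-- _STATUSES = ["connected", "pending", "rate_limited", "disconnected", "disabled"]
--
-- def _source_context(source_health):
--     items = list((source_health or {}).items())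
--     return {
--         status: [
--             name
--             for name, data in items
--             if str(data.get("status", "unknown")).lower() == status
--         ]
--         for status in _STATUSES
--     }
-- ===== Notes on version B (the rewrite author's own statement) =====
-- stated objective: idiomatic
-- what changed: Replaces the mutable-accumulator grouping loop (one pass appending into a pre-built dict) by a dict comprehension that, for each of the five fixed statuses, filters the items for names with that normalised status.
import Mathlib
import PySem

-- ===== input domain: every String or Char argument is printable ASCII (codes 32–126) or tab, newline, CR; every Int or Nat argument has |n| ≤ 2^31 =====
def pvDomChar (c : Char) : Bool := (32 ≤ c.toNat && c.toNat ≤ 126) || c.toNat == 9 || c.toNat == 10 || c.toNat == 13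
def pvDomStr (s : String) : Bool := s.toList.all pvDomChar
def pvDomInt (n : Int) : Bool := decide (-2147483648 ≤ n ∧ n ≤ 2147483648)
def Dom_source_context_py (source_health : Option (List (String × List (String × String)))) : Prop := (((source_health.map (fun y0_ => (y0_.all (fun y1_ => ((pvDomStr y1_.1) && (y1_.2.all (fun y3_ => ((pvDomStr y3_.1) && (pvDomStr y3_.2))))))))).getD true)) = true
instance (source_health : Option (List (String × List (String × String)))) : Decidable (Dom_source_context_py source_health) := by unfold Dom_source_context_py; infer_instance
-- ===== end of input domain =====

-- B groups by one filtering scan per fixed status (dict comprehension) instead of A's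
-- single mutable-accumulator pass; equivalence of return values is proved below.

-- ===== PORT A =====
-- status = str(data.get("status", "unknown")).lower()  (str() is the identity on the str values here)
def pvNorm (data : List (String × String)) : String :=
  PySem.Str.lower ((PySem.Dict.mk data).getD "status" "unknown")

def source_context_py (source_health : Option (List (String × List (String × String)))) : List (String × List String) :=
  ((source_health.getD []).foldl
    (fun (grouped : PySem.Dict String (List String)) p =>
      let status := pvNorm p.2
      if grouped.contains status then grouped.modify status [] (fun l => l ++ [p.1]) else grouped)
    (PySem.Dict.mk [("connected", []), ("pending", []), ("rate_limited", []), ("disconnected", []), ("disabled", [])])).items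

-- ===== PORT B =====
def source_context_py_alt (source_health : Option (List (String × List (String × String)))) : List (String × List String) :=
  ["connected", "pending", "rate_limited", "disconnected", "disabled"].map
    (fun status =>
      (status, ((source_health.getD []).filter (fun p => pvNorm p.2 == status)).map (·.1)))

-- ===== PRECONDITION & SPEC =====
def Spec_source_context_py (source_health : Option (List (String × List (String × String)))) (out : List (String × List String)) : Prop := out = source_context_py_alt source_health
instance (source_health : Option (List (String × List (String × String)))) (out : List (String × List String)) : Decidable (Spec_source_context_py source_health out) := by unfold Spec_source_context_py; infer_instance

-- ===== CLAIM (what is proved, stated in full; the proofs are below) =====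
def Claim_equal_source_context_py : Prop := ∀ (source_health : Option (List (String × List (String × String)))), Dom_source_context_py source_health → Spec_source_context_py source_health (source_context_py source_health)

-- ===== LEMMAS AND PROOFS =====

-- abbreviation for A's loop step
def pvStep (grouped : PySem.Dict String (List String)) (p : String × List (String × String)) : PySem.Dict String (List String) :=
  let status := pvNorm p.2
  if grouped.contains status then grouped.modify status [] (fun l => l ++ [p.1]) else grouped

lemma pvKeys_loop (l : List (String × List (String × String))) (d : PySem.Dict String (List String)) :
    (l.foldl pvStep d).keys = d.keys := by
  induction l generalizing d with
  | nil => rfl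
  | cons p l ih =>
    simp only [List.foldl_cons]
    rw [ih]
    unfold pvStep
    by_cases h : d.contains (pvNorm p.2)
    · simp only [h, if_true, PySem.Dict.keys_modify]
      exact PySem.Dict.keys_insert_of_contains d _ h
    · simp [h]

lemma pvGetD_loop (l : List (String × List (String × String))) (d : PySem.Dict String (List String)) (c : String) :
    (l.foldl pvStep d).getD c [] =
      d.getD c [] ++ (if d.contains c then ((l.filter (fun p => pvNorm p.2 == c)).map (·.1)) else []) := by
  induction l generalizing d with
  | nil => simp
  | cons p l ih =>
    simp only [List.foldl_cons]
    rw [ih]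
    unfold pvStep
    by_cases hg : d.contains (pvNorm p.2)
    · simp only [hg, if_true, PySem.Dict.getD_modify, PySem.Dict.contains_modify]
      by_cases hc : c = pvNorm p.2
      · subst hc
        simp [hg]
      · have hb : (pvNorm p.2 == c) = false := by
          simp [(Ne.symm hc : pvNorm p.2 ≠ c)]
        simp [hc, hb]
    · simp only [hg, Bool.false_eq_true, if_false]
      by_cases hc : c = pvNorm p.2
      · subst hc
        simp [hg]
      · have hb : (pvNorm p.2 == c) = false := by
          simp [(Ne.symm hc : pvNorm p.2 ≠ c)]
        simp [hb]

theorem source_context_py_spec : Claim_equal_source_context_py := by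
  intro sh _
  unfold Spec_source_context_py source_context_py source_context_py_alt
  set d0 : PySem.Dict String (List String) :=
    PySem.Dict.mk [("connected", []), ("pending", []), ("rate_limited", []), ("disconnected", []), ("disabled", [])] with hd0
  set l := sh.getD [] with hl
  have hfold : (l.foldl
      (fun (grouped : PySem.Dict String (List String)) p =>
        let status := pvNorm p.2
        if grouped.contains status then grouped.modify status [] (fun l => l ++ [p.1]) else grouped) d0)
      = l.foldl pvStep d0 := rfl
  rw [hfold]
  have hnd : (l.foldl pvStep d0).keys.Nodup := by
    rw [pvKeys_loop]; decide
  rw [PySem.Dict.items_eq_map_keys _ hnd []]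
  rw [pvKeys_loop]
  have hk : d0.keys = ["connected", "pending", "rate_limited", "disconnected", "disabled"] := by decide
  rw [hk]
  simp only [List.map_cons, List.map_nil]
  have key : ∀ c : String, d0.contains c = true → d0.getD c [] = [] →
      (l.foldl pvStep d0).getD c [] = ((l.filter (fun p => pvNorm p.2 == c)).map (·.1)) := by
    intro c hc h0
    rw [pvGetD_loop, hc, h0]; simp
  rw [key "connected" (by decide) (by decide), key "pending" (by decide) (by decide),
      key "rate_limited" (by decide) (by decide), key "disconnected" (by decide) (by decide),
      key "disabled" (by decide) (by decide)]
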